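-- pv_equiv track=rewrite | github.com/JacobDev1/xl-converter | data/thread_manager.py | _getBurstThreadPool
-- ===== SOURCE A (Python) =====
-- def _getBurstThreadPool(workers: int, cores: int) -> list:
--     """
--     Distributes cores among workers to fully utilize the available cores.
--
--     Args:
--         workers - worker count
--         cores - available core count
--
--     Returns (examples):
--         (3, 6) -> [2,2,2]
--         (3, 5) -> [2,2,1]
--         (2, 5) -> [3,2]
--         (5, 5) -> []
--         (6, 5) -> []
--
--         If workers >= cores outputs an empty list
--     """
--     if workers >= cores or cores <= 0 or workers <= 0:
--         return []
--
--     base_threads = cores // workers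
--     extra_threads = cores % workers
--     thread_pool = [base_threads for _ in range(workers)]
--
--     for i in range(extra_threads):
--         thread_pool[i] += 1
--
--     return thread_pool
-- ===== SOURCE B (Python) =====
-- def _getBurstThreadPool(workers: int, cores: int) -> list:
--     if workers >= cores or cores <= 0 or workers <= 0:
--         return []
--     pool = []
--     remaining = cores
--     for slots in range(workers, 0, -1):
--         share = -(-remaining // slots)  # ceil division: fair share of what is left
--         pool.append(share)
--         remaining -= share
--     return pool
-- ===== Notes on version B (the rewrite author's own statement) =====
-- stated objective: alternative
-- what changed: Replaces the divmod-based construction (uniform base list, then incrementing the first cores%workers entries) with a greedy single pass that never computes base/extra: each worker receives the ceiling of remaining/remaining_slots and that share is subtracted from the remaining cores.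
import Mathlib
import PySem

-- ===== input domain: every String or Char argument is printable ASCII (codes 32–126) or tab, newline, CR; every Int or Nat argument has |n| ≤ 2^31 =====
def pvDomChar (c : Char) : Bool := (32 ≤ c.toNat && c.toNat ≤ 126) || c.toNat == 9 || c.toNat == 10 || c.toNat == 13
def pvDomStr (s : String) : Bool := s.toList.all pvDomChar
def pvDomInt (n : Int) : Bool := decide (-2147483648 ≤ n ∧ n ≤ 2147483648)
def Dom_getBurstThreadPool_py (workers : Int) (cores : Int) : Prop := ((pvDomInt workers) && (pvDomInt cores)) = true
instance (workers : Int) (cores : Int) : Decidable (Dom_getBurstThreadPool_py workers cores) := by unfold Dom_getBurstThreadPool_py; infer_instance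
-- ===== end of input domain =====

-- B replaces A's divmod construction (uniform base list + increment loop) with a
-- greedy single pass: each worker takes ceil(remaining/slots); objective: alternative (same cost).

-- ===== PORT A =====
def getBurstThreadPool_py (workers : Int) (cores : Int) : List Int :=
  if workers ≥ cores || cores ≤ 0 || workers ≤ 0 then []
  else
    let base_threads := PySem.Int.floordiv cores workers
    let extra_threads := PySem.Int.mod cores workers
    let thread_pool := (PySem.List.pyRange 0 workers 1).map (fun _ => base_threads)
    (PySem.List.pyRange 0 extra_threads 1).foldl
      (fun tp i => PySem.List.pySetD tp i (PySem.List.pyGetD tp i 0 + 1)) thread_pool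

-- ===== PORT B =====
-- the loop 'for slots in range(workers, 0, -1)': structural recursion on slots
def pvGreedyLoop : Nat → Int → List Int
  | 0, _ => []
  | s + 1, remaining =>
    let share := -(PySem.Int.floordiv (-remaining) ((s : Int) + 1))  -- -(-remaining // slots)
    share :: pvGreedyLoop s (remaining - share)

def getBurstThreadPool_py_alt (workers : Int) (cores : Int) : List Int :=
  if workers ≥ cores || cores ≤ 0 || workers ≤ 0 then []
  else pvGreedyLoop workers.toNat cores

-- ===== PRECONDITION & SPEC =====
def Spec_getBurstThreadPool_py (workers : Int) (cores : Int) (out : List Int) : Prop := out = getBurstThreadPool_py_alt workers cores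
instance (workers : Int) (cores : Int) (out : List Int) : Decidable (Spec_getBurstThreadPool_py workers cores out) := by unfold Spec_getBurstThreadPool_py; infer_instance

-- ===== CLAIM (what is proved, stated in full; the proofs are below) =====
def Claim_equal_getBurstThreadPool_py : Prop := ∀ (workers : Int) (cores : Int), Dom_getBurstThreadPool_py workers cores → Spec_getBurstThreadPool_py workers cores (getBurstThreadPool_py workers cores)

-- ===== LEMMAS AND PROOFS =====

-- A constant-valued comprehension over range(n) is a replicate.
theorem pv_map_const_pyRange (n : Int) (b : Int) :
    (PySem.List.pyRange 0 n 1).map (fun _ => b) = List.replicate n.toNat b := by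
  apply List.eq_replicate_iff.mpr
  constructor
  · simp [PySem.List.length_pyRange_one]
  · intro x hx
    simp at hx
    exact hx.2

-- A's side: incrementing the first e entries of replicate n b, one index at a time.
theorem pv_fold_incr (b : Int) (n e : Nat) (he : e ≤ n) :
    (PySem.List.pyRange 0 (e : Int) 1).foldl
        (fun tp i => PySem.List.pySetD tp i (PySem.List.pyGetD tp i 0 + 1))
        (List.replicate n b)
      = List.replicate e (b + 1) ++ List.replicate (n - e) b := by
  induction e with
  | zero => simp [PySem.List.pyRange_one_eq_nil]
  | succ e ih =>
    have he' : e ≤ n := Nat.le_of_succ_le he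
    have hsplit : PySem.List.pyRange 0 ((e : Int) + 1) 1
        = PySem.List.pyRange 0 (e : Int) 1 ++ [(e : Int)] :=
      PySem.List.pyRange_one_succ_right (by exact_mod_cast Nat.zero_le e)
    have hcast : ((e + 1 : Nat) : Int) = (e : Int) + 1 := by push_cast; ring
    rw [hcast, hsplit, List.foldl_append, ih he']
    have hlen1 : (List.replicate e (b + 1)).length = e := List.length_replicate
    have hget : PySem.List.pyGetD
        (List.replicate e (b + 1) ++ List.replicate (n - e) b) (e : Int) 0 = b := by
      rw [PySem.List.pyGetD_of_nonneg _ _ (by positivity), Int.toNat_natCast,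
          List.getD_eq_getElem?_getD, List.getElem?_append_right (by simp)]
      simp [show e < n from by omega]
    have hset : PySem.List.pySetD
        (List.replicate e (b + 1) ++ List.replicate (n - e) b) (e : Int) (b + 1)
        = (List.replicate e (b + 1) ++ List.replicate (n - e) b).set e (b + 1) := by
      rw [PySem.List.pySetD_of_nonneg _ _ (by positivity)]
      simp
    simp only [List.foldl_cons, List.foldl_nil, hget, hset]
    rw [List.set_append_right _ _ (by omega)]
    have hne : n - e = (n - (e + 1)) + 1 := by omega
    rw [hlen1, Nat.sub_self, hne]
    rw [List.replicate_succ, List.set_cons_zero]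
    rw [@List.replicate_succ' e Int (b + 1)]
    simp

-- B's side: the greedy ceiling loop over n+1 slots on remaining r = b*(n+1)+e
-- (0 ≤ e ≤ n) yields e shares of b+1 followed by n+1-e shares of b.
theorem pv_greedy_eq (n : Nat) : ∀ (r b e : Int), 0 ≤ e → e < (n : Int) + 1 →
    r = b * ((n : Int) + 1) + e →
    pvGreedyLoop (n + 1) r
      = List.replicate e.toNat (b + 1) ++ List.replicate ((n + 1) - e.toNat) b := by
  induction n with
  | zero =>
    intro r b e h0 h1 hr
    have he : e = 0 := by omega
    have hb : r = b := by omega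
    have hshare : -(PySem.Int.floordiv (-r) ((0 : Int) + 1)) = b := by
      rw [PySem.Int.neg_floordiv_neg_eq_iff_of_pos (by omega)]
      constructor <;> nlinarith
    have hunf : pvGreedyLoop (0 + 1) r
        = (-(PySem.Int.floordiv (-r) ((0 : Int) + 1))) :: pvGreedyLoop 0 (r - (-(PySem.Int.floordiv (-r) ((0 : Int) + 1)))) := by
      simp [pvGreedyLoop]
    rw [hunf, hshare, he]
    simp [pvGreedyLoop]
  | succ n ih =>
    intro r b e h0 h1 hr
    have hs : ((n + 1 : Nat) : Int) + 1 = (n : Int) + 2 := by push_cast; ring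
    by_cases he0 : e = 0
    · have hshare : -(PySem.Int.floordiv (-r) (((n + 1 : Nat) : Int) + 1)) = b := by
        rw [PySem.Int.neg_floordiv_neg_eq_iff_of_pos (by omega)]
        constructor <;> nlinarith
      have hrec := ih (r - b) b 0 (by omega) (by omega) (by rw [hr, he0]; push_cast; ring)
      have hunf : pvGreedyLoop (n + 1 + 1) r
          = (-(PySem.Int.floordiv (-r) (((n + 1 : Nat) : Int) + 1)))
            :: pvGreedyLoop (n + 1) (r - (-(PySem.Int.floordiv (-r) (((n + 1 : Nat) : Int) + 1)))) := rfl
      rw [hunf, hshare, hrec, he0]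
      simp [List.replicate_succ]
    · have hshare : -(PySem.Int.floordiv (-r) (((n + 1 : Nat) : Int) + 1)) = b + 1 := by
        have he1 : 1 ≤ e := by omega
        rw [PySem.Int.neg_floordiv_neg_eq_iff_of_pos (by omega)]
        rw [hr]; push_cast
        constructor <;> nlinarith
      have hrec := ih (r - (b + 1)) b (e - 1) (by omega) (by push_cast at h1 ⊢; omega)
        (by rw [hr]; push_cast; ring)
      have hunf : pvGreedyLoop (n + 1 + 1) r
          = (-(PySem.Int.floordiv (-r) (((n + 1 : Nat) : Int) + 1)))
            :: pvGreedyLoop (n + 1) (r - (-(PySem.Int.floordiv (-r) (((n + 1 : Nat) : Int) + 1)))) := rfl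
      rw [hunf, hshare, hrec]
      have h1' : (e - 1).toNat + 1 = e.toNat := by omega
      have h2' : (n + 1) - (e - 1).toNat = (n + 1 + 1) - e.toNat := by omega
      rw [← h1', h2', List.replicate_succ]
      simp
      omega

-- ===== VERDICT (by name: the statement is the Claim_ definition above) =====
theorem getBurstThreadPool_py_spec : Claim_equal_getBurstThreadPool_py := by
  intro workers cores _
  unfold Spec_getBurstThreadPool_py getBurstThreadPool_py getBurstThreadPool_py_alt
  by_cases hg : workers ≥ cores || cores ≤ 0 || workers ≤ 0
  · simp [hg]
  · rw [if_neg hg, if_neg hg]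
    simp only [Bool.or_eq_true, decide_eq_true_eq, not_or] at hg
    have hw : 0 < workers := by omega
    have hex0 : 0 ≤ PySem.Int.mod cores workers := PySem.Int.mod_nonneg cores hw
    have hexlt : PySem.Int.mod cores workers < workers := PySem.Int.mod_lt cores hw
    set base := PySem.Int.floordiv cores workers with hbase
    set extra := PySem.Int.mod cores workers with hextra
    have hEcast : ((extra.toNat : Nat) : Int) = extra := Int.toNat_of_nonneg hex0
    have hle : extra.toNat ≤ workers.toNat := by omega
    -- A's side reduces to the two replicate blocks
    simp only [pv_map_const_pyRange]
    rw [← hEcast, pv_fold_incr base workers.toNat extra.toNat hle]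
    -- B's side: workers.toNat = n + 1
    obtain ⟨n, hn⟩ : ∃ n : Nat, workers.toNat = n + 1 := ⟨workers.toNat - 1, by omega⟩
    have hcores : cores = base * ((n : Int) + 1) + extra := by
      have := PySem.Int.floordiv_mul_add_mod cores workers
      rw [← hbase, ← hextra] at this
      have hwn : ((n : Int) + 1) = workers := by omega
      rw [hwn]; linarith
    rw [hn, pv_greedy_eq n cores base extra hex0 (by omega) hcores]
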